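-- pv_equiv track=rewrite | github.com/ChangKuoman/Wumpus | Entregable 1/funciones_wumpus.py | positionStench
-- ===== SOURCE A (Python) =====
-- def positionStench(tablero, n): #crear estench y oro
--     for i in range(n):
--         for j in range(n):
--
--             if 'W' in tablero[(i+1)%n][j] and i != n-1:
--                 tablero[i][j].append('S')
--
--             if 'W' in tablero[(i-1)%n][j] and i != 0:
--                 tablero[i][j].append('S')
--
--             if 'W' in tablero[i][(j+1)%n] and j != n-1:
--                 tablero[i][j].append('S')
--
--             if 'W' in tablero[i][(j-1)%n] and j != 0:
--                 tablero[i][j].append('S')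
--
--     return tablero
-- ===== SOURCE B (Python) =====
-- def positionStench(tablero, n):  # Wumpus-centered scatter: each 'W' cell marks its in-grid neighbors
--     for i in range(n):
--         for j in range(n):
--             if 'W' in tablero[i][j]:
--                 if i > 0:
--                     tablero[i-1][j].append('S')
--                 if i < n-1:
--                     tablero[i+1][j].append('S')
--                 if j > 0:
--                     tablero[i][j-1].append('S')
--                 if j < n-1:
--                     tablero[i][j+1].append('S')
--     return tablero
-- ===== Notes on version B (the rewrite author's own statement) =====
-- stated objective: alternative
-- what changed: Replaces the per-cell gather (each cell probes its four neighbors with modular indexing and edge guards) by a Wumpus-centered scatter (each 'W' cell appends 'S' to its in-grid orthogonal neighbors); equivalent because every appended mark is the same 'S'.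
import Mathlib
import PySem

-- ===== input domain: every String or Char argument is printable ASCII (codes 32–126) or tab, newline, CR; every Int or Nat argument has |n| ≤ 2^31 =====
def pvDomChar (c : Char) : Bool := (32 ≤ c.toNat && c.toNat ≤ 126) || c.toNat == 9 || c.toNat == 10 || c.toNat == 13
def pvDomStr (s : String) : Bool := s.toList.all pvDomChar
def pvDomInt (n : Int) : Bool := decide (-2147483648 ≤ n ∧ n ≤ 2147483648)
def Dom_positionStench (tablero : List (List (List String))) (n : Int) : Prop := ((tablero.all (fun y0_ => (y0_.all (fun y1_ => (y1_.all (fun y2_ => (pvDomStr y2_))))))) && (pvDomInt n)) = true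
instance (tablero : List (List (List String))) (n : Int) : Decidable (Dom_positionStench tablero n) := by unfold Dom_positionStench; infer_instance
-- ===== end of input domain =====

set_option maxHeartbeats 1000000


-- B is an alternative, structurally different traversal (scatter from each 'W' cell instead of a
-- per-cell gather with modular indexing); both A and B mutate tablero in place in Python — the
-- mutations are identical (the same 'S' appends per cell), and the equivalence proved is about the
-- returned board.

-- shared board primitives (used verbatim by both ports)
abbrev PvBoard := List (List (List String))
def pvGetCell (b : PvBoard) (i j : Int) : List String := (b.getD i.toNat []).getD j.toNat []
-- 'W' in tablero[i][j]
def pvHasW (b : PvBoard) (i j : Int) : Bool := (pvGetCell b i j).contains "W"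
-- tablero[i][j].append('S')  (functional update; i, j are the in-range nonnegative indices Python uses)
def pvAddS (b : PvBoard) (i j : Int) : PvBoard :=
  b.modify i.toNat (fun row => row.modify j.toNat (fun cell => cell ++ ["S"]))

-- ===== PORT A =====
-- loop body of A for one (i, j): four gather checks at the modularly-indexed neighbors, in A's order
def pvBodyA (n : Int) (b : PvBoard) (i j : Int) : PvBoard :=
  let b1 := if pvHasW b (PySem.Int.mod (i+1) n) j && (i != n-1) then pvAddS b i j else b
  let b2 := if pvHasW b1 (PySem.Int.mod (i-1) n) j && (i != 0) then pvAddS b1 i j else b1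
  let b3 := if pvHasW b2 i (PySem.Int.mod (j+1) n) && (j != n-1) then pvAddS b2 i j else b2
  if pvHasW b3 i (PySem.Int.mod (j-1) n) && (j != 0) then pvAddS b3 i j else b3

def positionStench (tablero : List (List (List String))) (n : Int) : List (List (List String)) :=
  (PySem.List.pyRange 0 n 1).foldl (fun b i =>
    (PySem.List.pyRange 0 n 1).foldl (fun b j => pvBodyA n b i j) b) tablero

-- ===== PORT B =====
-- loop body of B for one (i, j): if the cell holds a Wumpus, mark its in-grid orthogonal neighbors
def pvBodyB (n : Int) (b : PvBoard) (i j : Int) : PvBoard :=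
  if pvHasW b i j then
    let b1 := if 0 < i then pvAddS b (i-1) j else b
    let b2 := if i < n-1 then pvAddS b1 (i+1) j else b1
    let b3 := if 0 < j then pvAddS b2 i (j-1) else b2
    if j < n-1 then pvAddS b3 i (j+1) else b3
  else b

def positionStench_alt (tablero : List (List (List String))) (n : Int) : List (List (List String)) :=
  (PySem.List.pyRange 0 n 1).foldl (fun b i =>
    (PySem.List.pyRange 0 n 1).foldl (fun b j => pvBodyB n b i j) b) tablero

-- ===== PRECONDITION & SPEC =====
-- Pre_ excludes exactly the inputs on which Python A raises IndexError: a positive n larger than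
-- the board (fewer than n rows, or a row among the first n with fewer than n columns).
def Pre_positionStench (tablero : List (List (List String))) (n : Int) : Prop :=
  0 < n → ((n ≤ (tablero.length : Int)) ∧ ∀ row ∈ tablero.take n.toNat, n ≤ (row.length : Int))
instance (tablero : List (List (List String))) (n : Int) : Decidable (Pre_positionStench tablero n) := by unfold Pre_positionStench; infer_instance

def pvWitness_positionStench : List (List (List String)) × Int := ([[["W"], []], [[], ["G"]]], 2)

def Spec_positionStench (tablero : List (List (List String))) (n : Int) (out : List (List (List String))) : Prop := out = positionStench_alt tablero n
instance (tablero : List (List (List String))) (n : Int) (out : List (List (List String))) : Decidable (Spec_positionStench tablero n out) := by unfold Spec_positionStench; infer_instance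

-- ===== CLAIM (what is proved, stated in full; the proofs are below) =====
def Claim_equal_positionStench : Prop := ∀ (tablero : List (List (List String))) (n : Int), Dom_positionStench tablero n → Pre_positionStench tablero n → Spec_positionStench tablero n (positionStench tablero n)

-- ===== LEMMAS AND PROOFS =====

-- apply one emitted mark
def pvApp (b : PvBoard) (t : Int × Int) : PvBoard := pvAddS b t.1 t.2

-- the marks A's body emits at (i, j), as a list of target cells (all equal to (i, j))
def pvItemsA (t0 : PvBoard) (n i j : Int) : List (Int × Int) :=
  (if pvHasW t0 (PySem.Int.mod (i+1) n) j && (i != n-1) then [(i,j)] else []) ++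
  (if pvHasW t0 (PySem.Int.mod (i-1) n) j && (i != 0) then [(i,j)] else []) ++
  (if pvHasW t0 i (PySem.Int.mod (j+1) n) && (j != n-1) then [(i,j)] else []) ++
  (if pvHasW t0 i (PySem.Int.mod (j-1) n) && (j != 0) then [(i,j)] else [])

-- the marks B's body emits at (i, j): the in-grid neighbors, if the cell holds a Wumpus
def pvNbrs (n i j : Int) : List (Int × Int) :=
  (if 0 < i then [(i-1, j)] else []) ++ (if i < n-1 then [(i+1, j)] else []) ++
  (if 0 < j then [(i, j-1)] else []) ++ (if j < n-1 then [(i, j+1)] else [])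
def pvItemsB (t0 : PvBoard) (n i j : Int) : List (Int × Int) :=
  if pvHasW t0 i j then pvNbrs n i j else []

def pvCells (n : Int) : List (Int × Int) :=
  (PySem.List.pyRange 0 n 1).flatMap (fun i => (PySem.List.pyRange 0 n 1).map (fun j => (i, j)))

theorem pv_modify_modify_comm {α : Type} (f g : α → α) (hfg : ∀ x, f (g x) = g (f x)) (l : List α) (i j : Nat) :
    (l.modify i f).modify j g = (l.modify j g).modify i f := by
  apply List.ext_getElem?
  intro k
  simp only [List.getElem?_modify, Option.map_eq_map, Option.map_map]
  cases l[k]? with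
  | none => rfl
  | some a =>
    simp only [Option.map_some, Function.comp]
    split_ifs with h1 h2 h2 <;> simp [hfg]

theorem pvAddS_comm (b : PvBoard) (i j p q : Int) :
    pvAddS (pvAddS b i j) p q = pvAddS (pvAddS b p q) i j := by
  unfold pvAddS
  apply pv_modify_modify_comm
  intro row
  apply pv_modify_modify_comm
  intro cell
  rfl

theorem pvHasW_addS (b : PvBoard) (i j p q : Int) : pvHasW (pvAddS b i j) p q = pvHasW b p q := by
  unfold pvHasW pvGetCell pvAddS
  simp only [List.getD_eq_getElem?_getD, List.getElem?_modify, Option.map_eq_map]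
  cases b[p.toNat]? with
  | none => rfl
  | some row =>
    simp only [Option.map_some, Option.getD_some]
    split_ifs with h1
    · simp only [List.getElem?_modify, Option.map_eq_map]
      cases row[q.toNat]? with
      | none => rfl
      | some cell =>
        simp only [Option.map_some, Option.getD_some]
        split_ifs with h2
        · simp [List.contains_eq_mem]
        · rfl
    · rfl

theorem pvBodyA_emit (n : Int) (b : PvBoard) (i j : Int) :
    pvBodyA n b i j = (pvItemsA b n i j).foldl pvApp b := by
  unfold pvBodyA pvItemsA
  cases h1 : pvHasW b (PySem.Int.mod (i+1) n) j && (i != n-1) <;>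
  cases h2 : pvHasW b (PySem.Int.mod (i-1) n) j && (i != 0) <;>
  cases h3 : pvHasW b i (PySem.Int.mod (j+1) n) && (j != n-1) <;>
  cases h4 : pvHasW b i (PySem.Int.mod (j-1) n) && (j != 0) <;>
  simp [h1, h2, h3, h4, pvHasW_addS, pvApp, List.foldl_append]

theorem pvBodyB_emit (n : Int) (b : PvBoard) (i j : Int) :
    pvBodyB n b i j = (pvItemsB b n i j).foldl pvApp b := by
  unfold pvBodyB pvItemsB pvNbrs
  cases hW : pvHasW b i j <;> simp only [hW]
  · rfl
  · split_ifs <;> simp [pvApp, List.foldl_append]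

theorem pv_emit_fold (items : PvBoard → Int → Int → List (Int × Int))
    (F : Int → PvBoard → Int → Int → PvBoard) (n : Int)
    (hF : ∀ b i j, F n b i j = (items b i j).foldl pvApp b)
    (hinv : ∀ b t i j, items (pvApp b t) i j = items b i j)
    (l : List (Int × Int)) (b0 : PvBoard) :
    l.foldl (fun b p => F n b p.1 p.2) b0 = (l.flatMap (fun p => items b0 p.1 p.2)).foldl pvApp b0 := by
  have hinv' : ∀ (l' : List (Int × Int)) (b : PvBoard) (i j : Int),
      items (l'.foldl pvApp b) i j = items b i j := by
    intro l'
    induction l' with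
    | nil => intro b i j; rfl
    | cons t l' ih => intro b i j; simp [List.foldl_cons, ih, hinv]
  induction l generalizing b0 with
  | nil => rfl
  | cons p l ih =>
    simp only [List.foldl_cons, List.flatMap_cons, List.foldl_append]
    rw [hF, ih]
    have he : (fun q : Int × Int => items ((items b0 p.1 p.2).foldl pvApp b0) q.1 q.2)
        = fun q : Int × Int => items b0 q.1 q.2 := funext fun q => hinv' _ _ _ _
    rw [he]

theorem pv_double_foldl (F : PvBoard → Int → Int → PvBoard) (l1 l2 : List Int) (b0 : PvBoard) :
    l1.foldl (fun b i => l2.foldl (fun b j => F b i j) b) b0 =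
      (l1.flatMap (fun i => l2.map (fun j => (i, j)))).foldl (fun b p => F b p.1 p.2) b0 := by
  induction l1 generalizing b0 with
  | nil => rfl
  | cons i l1 ih => simp [List.foldl_append, List.foldl_map, ih]

theorem pv_count_flatMap {α β : Type} [BEq β] (l : List α) (f : α → List β) (x : β) :
    (l.flatMap f).count x = (l.map (fun a => (f a).count x)).sum := by
  induction l with
  | nil => rfl
  | cons a l ih => simp [List.count_append, ih]

theorem pv_sum_map_add_nat {α : Type} (l : List α) (f g : α → Nat) :
    (l.map (fun a => f a + g a)).sum = (l.map f).sum + (l.map g).sum := by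
  induction l with
  | nil => rfl
  | cons a l ih => simp [ih]; omega

theorem pv_sum_point {α : Type} [DecidableEq α] (l : List α) (hl : l.Nodup) (a : α) (v : α → Nat) :
    (l.map (fun i => if i = a then v i else 0)).sum = if a ∈ l then v a else 0 := by
  induction l with
  | nil => simp
  | cons b l ih =>
    simp only [List.map_cons, List.sum_cons, List.mem_cons]
    rw [ih hl.of_cons]
    by_cases h : b = a
    · subst h
      simp [(List.nodup_cons.mp hl).1]
    · have h' : ¬ a = b := fun hh => h hh.symm
      simp [h, h']

theorem pv_nodup_cells (n : Int) : (pvCells n).Nodup :=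
  List.Nodup.product (PySem.List.nodup_pyRange_one 0 n) (PySem.List.nodup_pyRange_one 0 n)

theorem pv_mem_cells (n : Int) (a : Int × Int) :
    a ∈ pvCells n ↔ (0 ≤ a.1 ∧ a.1 < n ∧ 0 ≤ a.2 ∧ a.2 < n) := by
  obtain ⟨i, j⟩ := a
  show (i, j) ∈ (PySem.List.pyRange 0 n 1) ×ˢ (PySem.List.pyRange 0 n 1) ↔ _
  rw [List.mem_product]
  simp [PySem.List.mem_pyRange_one]
  tauto

theorem pv_count_opt (c : Prop) [Decidable c] (t x : Int × Int) :
    (if c then [t] else []).count x = if c ∧ t = x then 1 else 0 := by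
  by_cases h : c <;> by_cases h2 : t = x <;> simp [h, h2]

theorem pv_count_const {α : Type} [BEq α] [LawfulBEq α] [DecidableEq α] (l : List α) (a x : α) (h : ∀ y ∈ l, y = a) :
    l.count x = if a = x then l.length else 0 := by
  induction l with
  | nil => simp
  | cons b l ih =>
    have hb : b = a := h b (by simp)
    rw [List.count_cons, ih (fun y hy => h y (by simp [hy])), hb]
    by_cases hax : a = x <;> simp [hax]

theorem pv_mem_itemsA (t0 : PvBoard) (n i j : Int) : ∀ y ∈ pvItemsA t0 n i j, y = (i, j) := by
  intro y hy
  simp only [pvItemsA, List.mem_append] at hy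
  rcases hy with (((h|h)|h)|h) <;> (split_ifs at h <;> simp_all)

theorem pv_count_itemsA (t0 : PvBoard) (n p q : Int) (a : Int × Int) :
    (pvItemsA t0 n a.1 a.2).count (p, q) =
      if a = (p, q) then (pvItemsA t0 n a.1 a.2).length else 0 := by
  obtain ⟨i, j⟩ := a
  exact pv_count_const _ _ _ (pv_mem_itemsA t0 n i j)

theorem pv_count_itemsB (t0 : PvBoard) (n p q : Int) (a : Int × Int) :
    (pvItemsB t0 n a.1 a.2).count (p, q) =
      ((((if a = (p+1, q) then (if pvHasW t0 a.1 a.2 = true ∧ 0 < a.1 then 1 else 0) else 0) +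
      (if a = (p-1, q) then (if pvHasW t0 a.1 a.2 = true ∧ a.1 < n-1 then 1 else 0) else 0)) +
      (if a = (p, q+1) then (if pvHasW t0 a.1 a.2 = true ∧ 0 < a.2 then 1 else 0) else 0)) +
      (if a = (p, q-1) then (if pvHasW t0 a.1 a.2 = true ∧ a.2 < n-1 then 1 else 0) else 0)) := by
  obtain ⟨i, j⟩ := a
  by_cases hW : pvHasW t0 i j = true
  · simp only [pvItemsB, hW, if_true, pvNbrs, List.count_append, pv_count_opt,
      Prod.mk.injEq, true_and]
    split_ifs <;> omega
  · simp [pvItemsB, hW]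

theorem pv_mod_collapse (n a : Int) (h1 : 0 ≤ a) (h2 : a < n) : PySem.Int.mod a n = a := by
  rw [PySem.Int.mod_eq_emod_of_pos (by omega)]
  exact Int.emod_eq_of_lt h1 h2

theorem pv_count_eq (t0 : PvBoard) (n : Int) (x : Int × Int) :
    ((pvCells n).flatMap (fun a => pvItemsA t0 n a.1 a.2)).count x =
      ((pvCells n).flatMap (fun a => pvItemsB t0 n a.1 a.2)).count x := by
  obtain ⟨p, q⟩ := x
  rw [pv_count_flatMap, pv_count_flatMap]
  rw [List.map_congr_left (fun a _ => pv_count_itemsA t0 n p q a)]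
  rw [pv_sum_point _ (pv_nodup_cells n) (p, q) (fun a => (pvItemsA t0 n a.1 a.2).length)]
  rw [List.map_congr_left (fun a _ => pv_count_itemsB t0 n p q a)]
  rw [pv_sum_map_add_nat, pv_sum_map_add_nat, pv_sum_map_add_nat]
  rw [pv_sum_point _ (pv_nodup_cells n) (p+1, q) (fun a => if pvHasW t0 a.1 a.2 = true ∧ 0 < a.1 then 1 else 0)]
  rw [pv_sum_point _ (pv_nodup_cells n) (p-1, q) (fun a => if pvHasW t0 a.1 a.2 = true ∧ a.1 < n-1 then 1 else 0)]
  rw [pv_sum_point _ (pv_nodup_cells n) (p, q+1) (fun a => if pvHasW t0 a.1 a.2 = true ∧ 0 < a.2 then 1 else 0)]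
  rw [pv_sum_point _ (pv_nodup_cells n) (p, q-1) (fun a => if pvHasW t0 a.1 a.2 = true ∧ a.2 < n-1 then 1 else 0)]
  simp only [pv_mem_cells, pvItemsA, List.length_append, apply_ite List.length,
    List.length_cons, List.length_nil, Bool.and_eq_true, bne_iff_ne]
  simp only [Nat.zero_add]
  have hsplit : ∀ (G : Prop) (_ : Decidable G) (a b c d : Nat),
      (@ite _ G ‹_› (((a+b)+c)+d) 0) = (((@ite _ G ‹_› a 0) + (@ite _ G ‹_› b 0)) + (@ite _ G ‹_› c 0)) + (@ite _ G ‹_› d 0) := by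
    intro G hG a b c d
    split_ifs <;> simp
  rw [hsplit]
  have E1 : (if 0 ≤ p ∧ p < n ∧ 0 ≤ q ∧ q < n then (if pvHasW t0 (PySem.Int.mod (p+1) n) q = true ∧ p ≠ n-1 then 1 else 0) else 0)
      = (if 0 ≤ p+1 ∧ p+1 < n ∧ 0 ≤ q ∧ q < n then (if pvHasW t0 (p+1) q = true ∧ 0 < p+1 then 1 else 0) else 0) := by
    by_cases hg : 0 ≤ p ∧ p+1 < n ∧ 0 ≤ q ∧ q < n
    · obtain ⟨h1, h2, h3, h4⟩ := hg
      rw [pv_mod_collapse n (p+1) (by omega) (by omega)]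
      rw [if_pos (show 0 ≤ p ∧ p < n ∧ 0 ≤ q ∧ q < n from ⟨h1, by omega, h3, h4⟩), if_pos (show 0 ≤ p+1 ∧ p+1 < n ∧ 0 ≤ q ∧ q < n from ⟨by omega, h2, h3, h4⟩)]
      by_cases hw : pvHasW t0 (p+1) q = true
      · rw [if_pos (show pvHasW t0 (p+1) q = true ∧ p ≠ n-1 from ⟨hw, by omega⟩), if_pos (show pvHasW t0 (p+1) q = true ∧ 0 < p+1 from ⟨hw, by omega⟩)]
      · rw [if_neg (show ¬(pvHasW t0 (p+1) q = true ∧ p ≠ n-1) from fun h => hw h.1), if_neg (show ¬(pvHasW t0 (p+1) q = true ∧ 0 < p+1) from fun h => hw h.1)]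
    · have hL : (if 0 ≤ p ∧ p < n ∧ 0 ≤ q ∧ q < n then (if pvHasW t0 (PySem.Int.mod (p+1) n) q = true ∧ p ≠ n-1 then 1 else 0) else 0) = 0 := by
        by_cases h1 : 0 ≤ p ∧ p < n ∧ 0 ≤ q ∧ q < n
        · rw [if_pos h1, if_neg]
          rintro ⟨-, hne⟩
          obtain ⟨a1, a2, a3, a4⟩ := h1
          exact hg ⟨a1, by omega, a3, a4⟩
        · rw [if_neg h1]
      have hR : (if 0 ≤ p+1 ∧ p+1 < n ∧ 0 ≤ q ∧ q < n then (if pvHasW t0 (p+1) q = true ∧ 0 < p+1 then 1 else 0) else 0) = 0 := by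
        by_cases h2 : 0 ≤ p+1 ∧ p+1 < n ∧ 0 ≤ q ∧ q < n
        · rw [if_pos h2, if_neg]
          rintro ⟨-, h0⟩
          obtain ⟨b1, b2, b3, b4⟩ := h2
          exact hg ⟨by omega, b2, b3, b4⟩
        · rw [if_neg h2]
      rw [hL, hR]
  have E2 : (if 0 ≤ p ∧ p < n ∧ 0 ≤ q ∧ q < n then (if pvHasW t0 (PySem.Int.mod (p-1) n) q = true ∧ p ≠ 0 then 1 else 0) else 0)
      = (if 0 ≤ p-1 ∧ p-1 < n ∧ 0 ≤ q ∧ q < n then (if pvHasW t0 (p-1) q = true ∧ p-1 < n-1 then 1 else 0) else 0) := by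
    by_cases hg : 1 ≤ p ∧ p < n ∧ 0 ≤ q ∧ q < n
    · obtain ⟨h1, h2, h3, h4⟩ := hg
      rw [pv_mod_collapse n (p-1) (by omega) (by omega)]
      rw [if_pos (show 0 ≤ p ∧ p < n ∧ 0 ≤ q ∧ q < n from ⟨by omega, h2, h3, h4⟩), if_pos (show 0 ≤ p-1 ∧ p-1 < n ∧ 0 ≤ q ∧ q < n from ⟨by omega, by omega, h3, h4⟩)]
      by_cases hw : pvHasW t0 (p-1) q = true
      · rw [if_pos (show pvHasW t0 (p-1) q = true ∧ p ≠ 0 from ⟨hw, by omega⟩), if_pos (show pvHasW t0 (p-1) q = true ∧ p-1 < n-1 from ⟨hw, by omega⟩)]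
      · rw [if_neg (show ¬(pvHasW t0 (p-1) q = true ∧ p ≠ 0) from fun h => hw h.1), if_neg (show ¬(pvHasW t0 (p-1) q = true ∧ p-1 < n-1) from fun h => hw h.1)]
    · have hL : (if 0 ≤ p ∧ p < n ∧ 0 ≤ q ∧ q < n then (if pvHasW t0 (PySem.Int.mod (p-1) n) q = true ∧ p ≠ 0 then 1 else 0) else 0) = 0 := by
        by_cases h1 : 0 ≤ p ∧ p < n ∧ 0 ≤ q ∧ q < n
        · rw [if_pos h1, if_neg]
          rintro ⟨-, hne⟩
          obtain ⟨a1, a2, a3, a4⟩ := h1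
          exact hg ⟨by omega, a2, a3, a4⟩
        · rw [if_neg h1]
      have hR : (if 0 ≤ p-1 ∧ p-1 < n ∧ 0 ≤ q ∧ q < n then (if pvHasW t0 (p-1) q = true ∧ p-1 < n-1 then 1 else 0) else 0) = 0 := by
        by_cases h2 : 0 ≤ p-1 ∧ p-1 < n ∧ 0 ≤ q ∧ q < n
        · rw [if_pos h2, if_neg]
          rintro ⟨-, h0⟩
          obtain ⟨b1, b2, b3, b4⟩ := h2
          exact hg ⟨by omega, by omega, b3, b4⟩
        · rw [if_neg h2]
      rw [hL, hR]
  have E3 : (if 0 ≤ p ∧ p < n ∧ 0 ≤ q ∧ q < n then (if pvHasW t0 p (PySem.Int.mod (q+1) n) = true ∧ q ≠ n-1 then 1 else 0) else 0)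
      = (if 0 ≤ p ∧ p < n ∧ 0 ≤ q+1 ∧ q+1 < n then (if pvHasW t0 p (q+1) = true ∧ 0 < q+1 then 1 else 0) else 0) := by
    by_cases hg : 0 ≤ p ∧ p < n ∧ 0 ≤ q ∧ q+1 < n
    · obtain ⟨h1, h2, h3, h4⟩ := hg
      rw [pv_mod_collapse n (q+1) (by omega) (by omega)]
      rw [if_pos (show 0 ≤ p ∧ p < n ∧ 0 ≤ q ∧ q < n from ⟨h1, h2, h3, by omega⟩), if_pos (show 0 ≤ p ∧ p < n ∧ 0 ≤ q+1 ∧ q+1 < n from ⟨h1, h2, by omega, h4⟩)]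
      by_cases hw : pvHasW t0 p (q+1) = true
      · rw [if_pos (show pvHasW t0 p (q+1) = true ∧ q ≠ n-1 from ⟨hw, by omega⟩), if_pos (show pvHasW t0 p (q+1) = true ∧ 0 < q+1 from ⟨hw, by omega⟩)]
      · rw [if_neg (show ¬(pvHasW t0 p (q+1) = true ∧ q ≠ n-1) from fun h => hw h.1), if_neg (show ¬(pvHasW t0 p (q+1) = true ∧ 0 < q+1) from fun h => hw h.1)]
    · have hL : (if 0 ≤ p ∧ p < n ∧ 0 ≤ q ∧ q < n then (if pvHasW t0 p (PySem.Int.mod (q+1) n) = true ∧ q ≠ n-1 then 1 else 0) else 0) = 0 := by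
        by_cases h1 : 0 ≤ p ∧ p < n ∧ 0 ≤ q ∧ q < n
        · rw [if_pos h1, if_neg]
          rintro ⟨-, hne⟩
          obtain ⟨a1, a2, a3, a4⟩ := h1
          exact hg ⟨a1, a2, a3, by omega⟩
        · rw [if_neg h1]
      have hR : (if 0 ≤ p ∧ p < n ∧ 0 ≤ q+1 ∧ q+1 < n then (if pvHasW t0 p (q+1) = true ∧ 0 < q+1 then 1 else 0) else 0) = 0 := by
        by_cases h2 : 0 ≤ p ∧ p < n ∧ 0 ≤ q+1 ∧ q+1 < n
        · rw [if_pos h2, if_neg]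
          rintro ⟨-, h0⟩
          obtain ⟨b1, b2, b3, b4⟩ := h2
          exact hg ⟨b1, b2, by omega, b4⟩
        · rw [if_neg h2]
      rw [hL, hR]
  have E4 : (if 0 ≤ p ∧ p < n ∧ 0 ≤ q ∧ q < n then (if pvHasW t0 p (PySem.Int.mod (q-1) n) = true ∧ q ≠ 0 then 1 else 0) else 0)
      = (if 0 ≤ p ∧ p < n ∧ 0 ≤ q-1 ∧ q-1 < n then (if pvHasW t0 p (q-1) = true ∧ q-1 < n-1 then 1 else 0) else 0) := by
    by_cases hg : 0 ≤ p ∧ p < n ∧ 1 ≤ q ∧ q < n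
    · obtain ⟨h1, h2, h3, h4⟩ := hg
      rw [pv_mod_collapse n (q-1) (by omega) (by omega)]
      rw [if_pos (show 0 ≤ p ∧ p < n ∧ 0 ≤ q ∧ q < n from ⟨h1, h2, by omega, h4⟩), if_pos (show 0 ≤ p ∧ p < n ∧ 0 ≤ q-1 ∧ q-1 < n from ⟨h1, h2, by omega, by omega⟩)]
      by_cases hw : pvHasW t0 p (q-1) = true
      · rw [if_pos (show pvHasW t0 p (q-1) = true ∧ q ≠ 0 from ⟨hw, by omega⟩), if_pos (show pvHasW t0 p (q-1) = true ∧ q-1 < n-1 from ⟨hw, by omega⟩)]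
      · rw [if_neg (show ¬(pvHasW t0 p (q-1) = true ∧ q ≠ 0) from fun h => hw h.1), if_neg (show ¬(pvHasW t0 p (q-1) = true ∧ q-1 < n-1) from fun h => hw h.1)]
    · have hL : (if 0 ≤ p ∧ p < n ∧ 0 ≤ q ∧ q < n then (if pvHasW t0 p (PySem.Int.mod (q-1) n) = true ∧ q ≠ 0 then 1 else 0) else 0) = 0 := by
        by_cases h1 : 0 ≤ p ∧ p < n ∧ 0 ≤ q ∧ q < n
        · rw [if_pos h1, if_neg]
          rintro ⟨-, hne⟩
          obtain ⟨a1, a2, a3, a4⟩ := h1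
          exact hg ⟨a1, a2, by omega, a4⟩
        · rw [if_neg h1]
      have hR : (if 0 ≤ p ∧ p < n ∧ 0 ≤ q-1 ∧ q-1 < n then (if pvHasW t0 p (q-1) = true ∧ q-1 < n-1 then 1 else 0) else 0) = 0 := by
        by_cases h2 : 0 ≤ p ∧ p < n ∧ 0 ≤ q-1 ∧ q-1 < n
        · rw [if_pos h2, if_neg]
          rintro ⟨-, h0⟩
          obtain ⟨b1, b2, b3, b4⟩ := h2
          exact hg ⟨b1, b2, by omega, by omega⟩
        · rw [if_neg h2]
      rw [hL, hR]
  rw [E1, E2, E3, E4]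

theorem pv_perm (t0 : PvBoard) (n : Int) :
    ((pvCells n).flatMap (fun p => pvItemsA t0 n p.1 p.2)).Perm
      ((pvCells n).flatMap (fun p => pvItemsB t0 n p.1 p.2)) := by
  rw [List.perm_iff_count]
  intro x
  exact pv_count_eq t0 n x

theorem pv_foldl_perm (l1 l2 : List (Int × Int)) (h : l1.Perm l2) (b : PvBoard) :
    l1.foldl pvApp b = l2.foldl pvApp b :=
  @List.Perm.foldl_eq _ _ pvApp _ _ ⟨fun b x y => by simp only [pvApp]; exact pvAddS_comm b x.1 x.2 y.1 y.2⟩ h b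

-- ===== VERDICT (by name: the statement is the Claim_ definition above) =====
theorem positionStench_spec : Claim_equal_positionStench := by
  intro tablero n _ _
  unfold Spec_positionStench positionStench positionStench_alt
  rw [pv_double_foldl (pvBodyA n), pv_double_foldl (pvBodyB n)]
  rw [pv_emit_fold (fun b i j => pvItemsA b n i j) pvBodyA n (fun b i j => pvBodyA_emit n b i j)
        (by intro b t i j; simp [pvItemsA, pvApp, pvHasW_addS])]
  rw [pv_emit_fold (fun b i j => pvItemsB b n i j) pvBodyB n (fun b i j => pvBodyB_emit n b i j)
        (by intro b t i j; simp [pvItemsB, pvApp, pvHasW_addS])]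
  have hp := pv_perm tablero n
  simp only [pvCells] at hp
  exact pv_foldl_perm _ _ hp tablero
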